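-- pv_equiv track=rewrite | github.com/pphili/bitcast | conversion.py | hex_to_b58
-- ===== SOURCE A (Python) =====
-- def dec_to(n, alphabet):
-- 	N = n
-- 	s = ''
-- 	while N > 0:
-- 		digit = N % len(alphabet)
-- 		digit_char = alphabet[digit]
-- 		s = digit_char + s
-- 		N //= len(alphabet)
-- 	return s
--
-- def hex_to_b58(address_hex):
--     alphabet = '123456789ABCDEFGHJKLMNPQRSTUVWXYZabcdefghijkmnopqrstuvwxyz'
--     # Get the number of leading zeros
--     leading_zeros = len(address_hex) - len(address_hex.lstrip('0'))
--     # Convert hex to decimal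
--     address_int = int(address_hex, 16)
--     # Convert decimal to base58
--     b58_string = dec_to(address_int, alphabet)
--     # Add '1' for each 2 leading zeros
--     ones = leading_zeros // 2
--     for one in range(ones):
--         b58_string = '1' + b58_string
--     return b58_string
-- ===== SOURCE B (Python) =====
-- def hex_to_b58(address_hex):
--     alphabet = '123456789ABCDEFGHJKLMNPQRSTUVWXYZabcdefghijkmnopqrstuvwxyz'
--     n = int(address_hex, 16)
--     big = n.to_bytes((n.bit_length() + 7) // 8, 'big') if n > 0 else b''
--     digits = []            # base-58 digits, least significant first
--     for byte in big:
--         carry = byte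
--         for i in range(len(digits)):
--             carry += digits[i] * 256
--             digits[i] = carry % 58
--             carry //= 58
--         while carry:
--             digits.append(carry % 58)
--             carry //= 58
--     ones = (len(address_hex) - len(address_hex.lstrip('0'))) // 2
--     return '1' * ones + ''.join(alphabet[d] for d in reversed(digits))
-- ===== Notes on version B (the rewrite author's own statement) =====
-- stated objective: alternative
-- what changed: Replaces dec_to's repeated big-int division by 58 (prepending characters to a string) with the classic byte-carry base58 encoder: the value's minimal big-endian bytes are folded into a little-endian base-58 digit list by carry propagation, then reversed and mapped through the alphabet; the leading-one prefix is built by string repetition instead of a loop.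
import Mathlib
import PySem

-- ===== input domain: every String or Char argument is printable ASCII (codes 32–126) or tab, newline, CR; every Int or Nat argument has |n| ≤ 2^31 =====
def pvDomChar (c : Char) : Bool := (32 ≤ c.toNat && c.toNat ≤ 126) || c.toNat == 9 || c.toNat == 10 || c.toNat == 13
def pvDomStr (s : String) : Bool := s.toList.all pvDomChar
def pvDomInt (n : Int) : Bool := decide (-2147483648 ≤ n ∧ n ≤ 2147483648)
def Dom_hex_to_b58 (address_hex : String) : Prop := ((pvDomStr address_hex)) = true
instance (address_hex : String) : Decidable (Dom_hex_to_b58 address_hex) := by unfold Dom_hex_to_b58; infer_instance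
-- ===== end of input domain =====

-- B replaces dec_to's repeated division by 58 with the classic byte-carry base58 encoder (alternative algorithm, similar cost).

-- ===== PORT A =====
def pvAlphabet : List Char := "123456789ABCDEFGHJKLMNPQRSTUVWXYZabcdefghijkmnopqrstuvwxyz".toList

-- dec_to's while loop, specialised to A's only alphabet (len(alphabet) = 58).
-- alphabet[digit] is in range whenever the loop runs, so the `.getD ' '` branch is unreachable.
def pvDecToLoop (N : Int) (s : List Char) : List Char :=
  if 0 < N then
    pvDecToLoop (PySem.Int.floordiv N 58)
      (((PySem.List.pyGet? pvAlphabet (PySem.Int.mod N 58)).getD ' ') :: s)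
  else s
termination_by N.toNat
decreasing_by
  rw [PySem.Int.floordiv_eq_ediv_of_pos (by omega : (0:Int) < 58)]
  omega

def hex_to_b58 (address_hex : String) : String :=
  -- address_hex.lstrip('0') is exactly dropWhile (· == '0')
  let leading_zeros : Int :=
    ((address_hex.toList).length : Int) - (((address_hex.toList).dropWhile (· == '0')).length : Int)
  match PySem.Int.ofStrBase? address_hex 16 with   -- int(address_hex, 16)
  | none => ""                                     -- ValueError; excluded by Pre_
  | some address_int =>
    let b58 := pvDecToLoop address_int []
    let ones := PySem.Int.floordiv leading_zeros 2
    String.ofList ((PySem.List.pyRange 0 ones 1).foldl (fun s _ => '1' :: s) b58)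

-- ===== PORT B =====
-- little-endian base-256 bytes of k; (pvBytesLE k).reverse is k.to_bytes((k.bit_length()+7)//8, 'big')
-- for k > 0 (the minimal big-endian byte string).
def pvBytesLE (k : Nat) : List Nat :=
  if k = 0 then [] else k % 256 :: pvBytesLE (k / 256)

-- the `while carry:` tail of B's inner loop
def pvCarryTail (c : Nat) : List Nat :=
  if c = 0 then [] else c % 58 :: pvCarryTail (c / 58)

-- one byte folded into the digit list: for each existing digit, carry += digit*256;
-- digit = carry % 58; carry //= 58 — then append the remaining carry digits
def pvPropagate : List Nat → Nat → List Nat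
  | [], c => pvCarryTail c
  | d :: ds, c => (d * 256 + c) % 58 :: pvPropagate ds ((d * 256 + c) / 58)

def hex_to_b58_alt (address_hex : String) : String :=
  match PySem.Int.ofStrBase? address_hex 16 with   -- int(address_hex, 16)
  | none => ""                                     -- ValueError; excluded by Pre_
  | some n =>
    let big : List Nat := if 0 < n then (pvBytesLE n.toNat).reverse else []
    let digits : List Nat := big.foldl (fun ds b => pvPropagate ds b) []
    let ones : Int := PySem.Int.floordiv
      (((address_hex.toList).length : Int) - (((address_hex.toList).dropWhile (· == '0')).length : Int)) 2
    String.ofList (PySem.List.pyRepeat ['1'] ones ++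
      digits.reverse.map (fun d => (PySem.List.pyGet? pvAlphabet (d : Int)).getD ' '))

-- ===== PRECONDITION & SPEC =====
-- Pre_: int(address_hex, 16) succeeds (otherwise A raises ValueError).
def Pre_hex_to_b58 (address_hex : String) : Prop :=
  PySem.Int.ofStrBase? address_hex 16 ≠ none
instance (address_hex : String) : Decidable (Pre_hex_to_b58 address_hex) := by
  unfold Pre_hex_to_b58; infer_instance

def pvWitness_hex_to_b58 : String := "00ff"

def Spec_hex_to_b58 (address_hex : String) (out : String) : Prop := out = hex_to_b58_alt address_hex
instance (address_hex : String) (out : String) : Decidable (Spec_hex_to_b58 address_hex out) := by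
  unfold Spec_hex_to_b58; infer_instance

-- ===== CLAIM (what is proved, stated in full; the proofs are below) =====
def Claim_equal_hex_to_b58 : Prop := ∀ (address_hex : String), Dom_hex_to_b58 address_hex → Pre_hex_to_b58 address_hex → Spec_hex_to_b58 address_hex (hex_to_b58 address_hex)

-- ===== LEMMAS AND PROOFS =====

theorem pvCarryTail_zero : pvCarryTail 0 = [] := by rw [pvCarryTail]; rfl

-- carry propagation turns the digit list of m into the digit list of 256*m + c
theorem pvPropagate_carryTail (m c : Nat) :
    pvPropagate (pvCarryTail m) c = pvCarryTail (256 * m + c) := by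
  induction m using Nat.strong_induction_on generalizing c with
  | _ m ih =>
    by_cases hm : m = 0
    · subst hm
      rw [pvCarryTail_zero, Nat.mul_zero, Nat.zero_add]
      rfl
    · rw [pvCarryTail, if_neg hm]
      rw [pvPropagate, ih (m / 58) (Nat.div_lt_self (Nat.pos_of_ne_zero hm) (by omega))]
      conv_rhs => rw [pvCarryTail]
      rw [if_neg (by omega : ¬ 256 * m + c = 0)]
      have e1 : (m % 58 * 256 + c) % 58 = (256 * m + c) % 58 := by omega
      have e2 : 256 * (m / 58) + (m % 58 * 256 + c) / 58 = (256 * m + c) / 58 := by omega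
      rw [e1, e2]

-- folding bytes through pvPropagate tracks the base-256 value
theorem pvFold_propagate (l : List Nat) (m : Nat) :
    l.foldl (fun ds b => pvPropagate ds b) (pvCarryTail m)
      = pvCarryTail (l.foldl (fun a b => 256 * a + b) m) := by
  induction l generalizing m with
  | nil => rfl
  | cons b bs ih => simp [List.foldl, pvPropagate_carryTail, ih]

-- the big-endian bytes of k fold back to k
theorem pvBytes_val (k : Nat) :
    (pvBytesLE k).foldr (fun b a => 256 * a + b) 0 = k := by
  induction k using Nat.strong_induction_on with
  | _ k ih =>
    by_cases hk : k = 0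
    · subst hk; rw [pvBytesLE]; rfl
    · rw [pvBytesLE, if_neg hk]
      rw [List.foldr, ih (k / 256) (Nat.div_lt_self (Nat.pos_of_ne_zero hk) (by omega))]
      omega

-- A's while loop produces the reversed digit list, rendered through the alphabet
theorem pvDecToLoop_eq (N : Int) (s : List Char) :
    pvDecToLoop N s
      = (pvCarryTail N.toNat).reverse.map
          (fun d => (PySem.List.pyGet? pvAlphabet (d : Int)).getD ' ') ++ s := by
  induction N, s using pvDecToLoop.induct with
  | case1 N s hN ih =>
    have hcast : N = ((N.toNat : Nat) : Int) := by omega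
    have h1 : PySem.Int.mod N 58 = ((N.toNat % 58 : Nat) : Int) := by
      rw [hcast]; exact_mod_cast PySem.Int.mod_natCast N.toNat 58
    have h2 : (PySem.Int.floordiv N 58).toNat = N.toNat / 58 := by
      rw [hcast]
      rw [show PySem.Int.floordiv ((N.toNat : Nat) : Int) 58 = ((N.toNat / 58 : Nat) : Int) from
        by exact_mod_cast PySem.Int.floordiv_natCast N.toNat 58]
      omega
    have hu : pvCarryTail N.toNat = N.toNat % 58 :: pvCarryTail (N.toNat / 58) := by
      rw [pvCarryTail, if_neg (by omega : ¬ N.toNat = 0)]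
    rw [pvDecToLoop, if_pos hN, ih, h2, hu, h1]
    simp
  | case2 N s hN =>
    rw [pvDecToLoop, if_neg hN]
    rw [show N.toNat = 0 from by omega]
    simp [pvCarryTail_zero]

-- prepending '1' once per range element = replicate
theorem pvFold_ones (l : List Int) (L : List Char) :
    l.foldl (fun s _ => '1' :: s) L = List.replicate l.length '1' ++ L := by
  induction l generalizing L with
  | nil => rfl
  | cons x xs ih =>
    rw [List.foldl, ih, List.length_cons, List.replicate_succ']
    simp

-- ===== VERDICT (by name: the statement is the Claim_ definition above) =====
theorem hex_to_b58_spec : Claim_equal_hex_to_b58 := by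
  intro address_hex _ hpre
  unfold Spec_hex_to_b58 hex_to_b58 hex_to_b58_alt
  cases hparse : PySem.Int.ofStrBase? address_hex 16 with
  | none => exact absurd hparse hpre
  | some n =>
    simp only []
    congr 1
    rw [pvDecToLoop_eq, pvFold_ones, PySem.List.pyRepeat_singleton]
    have hdigits :
        (if 0 < n then (pvBytesLE n.toNat).reverse else []).foldl
            (fun ds b => pvPropagate ds b) []
          = pvCarryTail n.toNat := by
      by_cases hn : 0 < n
      · rw [if_pos hn]
        rw [show ([] : List Nat) = pvCarryTail 0 from pvCarryTail_zero.symm, pvFold_propagate,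
          List.foldl_reverse]
        simp only [pvBytes_val]
      · rw [if_neg hn]
        rw [show n.toNat = 0 from by omega]
        exact pvCarryTail_zero.symm
    rw [hdigits, PySem.List.length_pyRange_one]
    simp
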